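-- pv_equiv track=rewrite | github.com/2018hsridhar/LEETCODE_REPO_2 | leetcode_616.py | makeBoldedString
-- ===== SOURCE A (Python) =====
-- from typing import List
--
-- def makeBoldedString(s:str, intervals:List[int]) -> str:
--     boldedString = ""
--     LEFT_BOLD = "<b>"
--     RIGHT_BOLD = "</b>"
--     # makeNewString
--     leftPos = set()
--     rightPos = set()
--     for [left,right] in intervals:
--         leftPos.add(left)
--         rightPos.add(right)
--     for index,letter in enumerate(s):
--         if(index in leftPos):
--             boldedString += LEFT_BOLD
--         if(index in rightPos):
--             boldedString += RIGHT_BOLD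
--         boldedString += letter
--     # ahh last interval case SMH
--     maxIndex = len(s)
--     if(maxIndex in rightPos):
--         boldedString += RIGHT_BOLD
--     return boldedString
-- ===== SOURCE B (Python) =====
-- def makeBoldedString(s, intervals):
--     n = len(s)
--     leftPos = set()
--     rightPos = set()
--     for left, right in intervals:
--         leftPos.add(left)
--         rightPos.add(right)
--     events = [(l, 0) for l in leftPos if 0 <= l < n] + \
--              [(r, 1) for r in rightPos if 0 <= r <= n]
--     events.sort()
--     parts = []
--     prev = 0
--     for pos, prio in events:
--         parts.append(s[prev:pos])
--         parts.append("<b>" if prio == 0 else "</b>")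
--         prev = pos
--     parts.append(s[prev:])
--     return "".join(parts)
-- ===== Notes on version B (the rewrite author's own statement) =====
-- stated objective: alternative
-- what changed: Instead of scanning every character with two set-membership tests, B builds a sorted list of (position, priority) tag-insertion events (open tags before close tags at equal positions) and stitches the answer from string slices between consecutive events.
import Mathlib
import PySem

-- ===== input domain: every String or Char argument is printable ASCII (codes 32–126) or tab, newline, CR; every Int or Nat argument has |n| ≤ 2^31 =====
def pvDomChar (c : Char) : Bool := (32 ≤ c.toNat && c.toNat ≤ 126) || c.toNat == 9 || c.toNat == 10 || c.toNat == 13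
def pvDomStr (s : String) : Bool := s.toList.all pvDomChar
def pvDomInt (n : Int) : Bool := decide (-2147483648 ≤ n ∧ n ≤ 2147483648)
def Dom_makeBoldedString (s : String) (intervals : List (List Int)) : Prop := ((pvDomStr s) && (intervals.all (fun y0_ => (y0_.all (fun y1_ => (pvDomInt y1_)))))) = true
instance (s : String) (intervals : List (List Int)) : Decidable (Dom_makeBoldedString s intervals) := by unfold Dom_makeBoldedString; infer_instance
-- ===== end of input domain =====

-- B replaces A's per-character scan with set-membership tests by a sorted list of
-- (position, priority) tag events stitched together with string slices.

def pvLB : List Char := ['<', 'b', '>']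
def pvRB : List Char := ['<', '/', 'b', '>']

-- shared by both Pythons: the loop collecting the two endpoint sets
def pvPosSets (intervals : List (List Int)) : PySem.Set Int × PySem.Set Int :=
  intervals.foldl
    (fun ps iv => (PySem.Set.add ps.1 (PySem.List.pyGetD iv 0 0),
                   PySem.Set.add ps.2 (PySem.List.pyGetD iv 1 0)))
    ([], [])

-- ===== PORT A =====
def makeBoldedString (s : String) (intervals : List (List Int)) : String :=
  let ps := pvPosSets intervals
  let body := (PySem.List.enumerate s.toList 0).foldl
    (fun acc p =>
      ((acc ++ (if PySem.Set.contains ps.1 p.1 then pvLB else []))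
            ++ (if PySem.Set.contains ps.2 p.1 then pvRB else [])) ++ [p.2]) []
  String.ofList (if PySem.Set.contains ps.2 (PySem.Str.len s) then body ++ pvRB else body)

-- ===== PORT B =====
def makeBoldedString_alt (s : String) (intervals : List (List Int)) : String :=
  let cs := s.toList
  let n := PySem.Str.len s
  let ps := pvPosSets intervals
  let events :=
    (ps.1.filter (fun l => decide (0 ≤ l ∧ l < n))).map (fun l => (l, (0 : Int)))
      ++ (ps.2.filter (fun r => decide (0 ≤ r ∧ r ≤ n))).map (fun r => (r, (1 : Int)))
  let es := PySem.List.sorted2 events (fun e => e.1) (fun e => e.2)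
  let st := es.foldl
    (fun (st : List Char × Int) e =>
      (st.1 ++ PySem.List.slice cs (some st.2) (some e.1) ++ (if e.2 == 0 then pvLB else pvRB),
       e.1))
    ([], 0)
  String.ofList (st.1 ++ PySem.List.slice cs (some st.2) none)

-- ===== PRECONDITION & SPEC =====
-- Pre_ excludes exactly the inputs where A's unpacking 'for [left,right] in intervals' raises ValueError.
def Pre_makeBoldedString (s : String) (intervals : List (List Int)) : Prop :=
  ∀ iv ∈ intervals, iv.length = 2
instance (s : String) (intervals : List (List Int)) : Decidable (Pre_makeBoldedString s intervals) := by
  unfold Pre_makeBoldedString; infer_instance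

def pvWitness_makeBoldedString : String × List (List Int) := ("abcdef", [[1, 3], [4, 5], [0, 2]])

def Spec_makeBoldedString (s : String) (intervals : List (List Int)) (out : String) : Prop := out = makeBoldedString_alt s intervals
instance (s : String) (intervals : List (List Int)) (out : String) : Decidable (Spec_makeBoldedString s intervals out) := by unfold Spec_makeBoldedString; infer_instance

-- ===== CLAIM (what is proved, stated in full; the proofs are below) =====
def Claim_equal_makeBoldedString : Prop := ∀ (s : String) (intervals : List (List Int)), Dom_makeBoldedString s intervals → Pre_makeBoldedString s intervals → Spec_makeBoldedString s intervals (makeBoldedString s intervals)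

-- ===== LEMMAS AND PROOFS =====

-- the tag/character piece of the output at position j (lp/rp : the endpoint sets)
def pvPiece (cs : List Char) (lp rp : List Int) (j : Nat) : List Char :=
  (if (j : Int) ∈ lp ∧ j < cs.length then pvLB else [])
    ++ (if (j : Int) ∈ rp then pvRB else [])
    ++ (cs.drop j).take 1

-- the tag events at position j, in output order
def pvGroup (cs : List Char) (lp rp : List Int) (j : Nat) : List (Int × Int) :=
  (if (j : Int) ∈ lp ∧ j < cs.length then [((j : Int), (0 : Int))] else [])
    ++ (if (j : Int) ∈ rp then [((j : Int), (1 : Int))] else [])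

-- B's fold step and its final stitching
def pvStep (cs : List Char) (st : List Char × Int) (e : Int × Int) : List Char × Int :=
  (st.1 ++ PySem.List.slice cs (some st.2) (some e.1) ++ (if e.2 == 0 then pvLB else pvRB), e.1)

def pvFinish (cs : List Char) (es : List (Int × Int)) (acc : List Char) (prev : Int) : List Char :=
  let r := es.foldl (pvStep cs) (acc, prev)
  r.1 ++ PySem.List.slice cs (some r.2) none

lemma pvPosSets_eq (intervals : List (List Int)) :
    pvPosSets intervals =
      (PySem.Set.ofList (intervals.map (fun iv => PySem.List.pyGetD iv 0 0)),
       PySem.Set.ofList (intervals.map (fun iv => PySem.List.pyGetD iv 1 0))) := by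
  unfold pvPosSets
  rw [PySem.List.foldl_prod_mk (f := fun s iv => PySem.Set.add s (PySem.List.pyGetD iv 0 0))
        (g := fun s iv => PySem.Set.add s (PySem.List.pyGetD iv 1 0))]
  rw [← PySem.Set.update_map_eq_foldl_add, ← PySem.Set.update_map_eq_foldl_add,
      PySem.Set.update_nil_left, PySem.Set.update_nil_left]

-- A's loop output is the canonical flatMap of pieces
lemma pvA_core (cs : List Char) (lp rp : List Int) :
    (if PySem.Set.contains rp ((cs.length : Nat) : Int) then
        ((PySem.List.enumerate cs 0).foldl
          (fun acc p =>
            ((acc ++ (if PySem.Set.contains lp p.1 then pvLB else []))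
              ++ (if PySem.Set.contains rp p.1 then pvRB else [])) ++ [p.2]) []) ++ pvRB
     else
        (PySem.List.enumerate cs 0).foldl
          (fun acc p =>
            ((acc ++ (if PySem.Set.contains lp p.1 then pvLB else []))
              ++ (if PySem.Set.contains rp p.1 then pvRB else [])) ++ [p.2]) [])
    = (List.range (cs.length + 1)).flatMap (pvPiece cs lp rp) := by
  have hfold :
      (PySem.List.enumerate cs 0).foldl
          (fun acc p =>
            ((acc ++ (if PySem.Set.contains lp p.1 then pvLB else []))
              ++ (if PySem.Set.contains rp p.1 then pvRB else [])) ++ [p.2]) []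
        = (PySem.List.enumerate cs 0).flatMap
            (fun p => ((if PySem.Set.contains lp p.1 then pvLB else [])
              ++ (if PySem.Set.contains rp p.1 then pvRB else [])) ++ [p.2]) := by
    rw [show (fun (acc : List Char) (p : Int × Char) =>
            ((acc ++ (if PySem.Set.contains lp p.1 then pvLB else []))
              ++ (if PySem.Set.contains rp p.1 then pvRB else [])) ++ [p.2])
        = fun acc p => acc ++ (((if PySem.Set.contains lp p.1 then pvLB else [])
              ++ (if PySem.Set.contains rp p.1 then pvRB else [])) ++ [p.2]) by
        funext acc p; simp]
    rw [PySem.List.foldl_append_eq_flatMap]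
    simp
  have hen : PySem.List.enumerate cs
      = List.map (fun k : Nat => ((k : Int), PySem.List.pyGetD cs (k : Int) 'a'))
          (List.range cs.length) := by
    apply List.ext_getElem
    · simp [PySem.List.length_enumerate]
    · intro k h1 h2
      simp only [PySem.List.length_enumerate] at h1
      rw [PySem.List.getElem_enumerate]
      simp only [List.getElem_map, List.getElem_range]
      rw [PySem.List.pyGetD_natCast]
      simp [List.getD_eq_getElem?_getD, List.getElem?_eq_getElem h1]
  have hmain :
      (PySem.List.enumerate cs 0).flatMap
          (fun p => ((if PySem.Set.contains lp p.1 then pvLB else [])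
              ++ (if PySem.Set.contains rp p.1 then pvRB else [])) ++ [p.2])
        = (List.range cs.length).flatMap (pvPiece cs lp rp) := by
    rw [hen, List.flatMap_map]
    apply List.flatMap_congr
    intro k hk
    rw [List.mem_range] at hk
    have h2 : (cs.drop k).take 1 = [PySem.List.pyGetD cs (k : Int) 'a'] := by
      rw [List.take_one, List.head?_drop, List.getElem?_eq_getElem hk,
          PySem.List.pyGetD_natCast]
      simp [List.getD_eq_getElem?_getD, List.getElem?_eq_getElem hk]
    simp only [pvPiece, PySem.Set.contains, h2]
    simp [hk, List.append_assoc]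
  have hlast : List.flatMap (pvPiece cs lp rp) [cs.length]
      = (if (cs.length : Int) ∈ rp then pvRB else []) := by
    simp [pvPiece, List.drop_length]
  rw [hfold, hmain, List.range_succ, List.flatMap_append, hlast]
  by_cases hr : (cs.length : Int) ∈ rp
  · simp [hr, PySem.Set.contains]
  · simp [hr, PySem.Set.contains]

-- sorted2 with two Int keys is a sort by the lexicographic key
lemma pvSorted2_eq_sorted_lex (xs : List (Int × Int)) :
    PySem.List.sorted2 xs (fun e => e.1) (fun e => e.2) false
      = PySem.List.sorted xs (fun e => toLex (e.1, e.2)) false := by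
  have hcmp : (fun (a b : Int × Int) => decide (a.1 < b.1) || (!decide (b.1 < a.1) && decide (a.2 < b.2)))
      = fun (a b : Int × Int) => decide (toLex (a.1, a.2) < toLex (b.1, b.2)) := by
    funext a b
    by_cases h1 : a.1 < b.1 <;> by_cases h2 : b.1 < a.1 <;> by_cases h3 : a.2 < b.2 <;>
      simp [h1, h2, h3, Prod.Lex.toLex_lt_toLex] <;> omega
  rw [PySem.List.sorted_eq_foldl_insertBy]
  simp [PySem.List.sorted2, hcmp]

lemma pvCanon_pairwise (cs : List Char) (lp rp : List Int) :
    ((List.range (cs.length + 1)).flatMap (pvGroup cs lp rp)).Pairwise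
      (fun a b => toLex (a.1, a.2) < toLex (b.1, b.2)) := by
  rw [List.pairwise_flatMap]
  constructor
  · intro j _
    unfold pvGroup
    by_cases hL : (j : Int) ∈ lp ∧ j < cs.length <;> by_cases hR : (j : Int) ∈ rp <;>
      simp [hL, hR, Prod.Lex.toLex_lt_toLex]
  · have h0 : (List.range (cs.length + 1)).Pairwise (· < ·) := List.pairwise_lt_range
    apply h0.imp
    intro j k hjk x hx y hy
    have hxj : x.1 = (j : Int) := by
      unfold pvGroup at hx
      rcases List.mem_append.1 hx with h | h <;> split at h <;> simp_all
    have hyk : y.1 = (k : Int) := by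
      unfold pvGroup at hy
      rcases List.mem_append.1 hy with h | h <;> split at h <;> simp_all
    rw [Prod.Lex.toLex_lt_toLex]
    left; rw [hxj, hyk]; exact_mod_cast hjk

-- the sorted event list is the canonical flatMap of groups
lemma pvSorted_eq (cs : List Char) (lp rp : PySem.Set Int) (hlp : lp.Nodup) (hrp : rp.Nodup) :
    PySem.List.sorted2
      ((lp.filter (fun l => decide (0 ≤ l ∧ l < PySem.List.len cs))).map (fun l => (l, (0 : Int)))
        ++ (rp.filter (fun r => decide (0 ≤ r ∧ r ≤ PySem.List.len cs))).map (fun r => (r, (1 : Int))))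
      (fun e => e.1) (fun e => e.2) false
      = (List.range (cs.length + 1)).flatMap (pvGroup cs lp rp) := by
  set events := ((lp.filter (fun l => decide (0 ≤ l ∧ l < PySem.List.len cs))).map (fun l => (l, (0 : Int)))
        ++ (rp.filter (fun r => decide (0 ≤ r ∧ r ≤ PySem.List.len cs))).map (fun r => (r, (1 : Int)))) with hev
  set canon := (List.range (cs.length + 1)).flatMap (pvGroup cs lp rp) with hc
  have hpw := pvCanon_pairwise cs lp rp
  have hnodC : canon.Nodup := by
    apply hpw.imp
    intro a b hab h
    rw [h] at hab; exact lt_irrefl _ hab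
  have hnodE : events.Nodup := by
    rw [hev]
    apply List.Nodup.append
    · exact ((hlp.filter _).map (fun a b h => by simpa using congrArg Prod.fst h))
    · exact ((hrp.filter _).map (fun a b h => by simpa using congrArg Prod.fst h))
    · intro a ha hb
      simp only [List.mem_map, List.mem_filter] at ha hb
      obtain ⟨_, _, h0⟩ := ha
      obtain ⟨_, _, h1⟩ := hb
      rw [← h1] at h0
      simpa using congrArg Prod.snd h0
  have hmem : ∀ e : Int × Int, e ∈ canon ↔ e ∈ events := by
    intro e
    rw [hev, hc]
    simp only [List.mem_flatMap, List.mem_range, pvGroup, List.mem_append, List.mem_map,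
      List.mem_filter, List.mem_ite_nil_right, List.mem_singleton, PySem.List.len_eq,
      decide_eq_true_eq]
    constructor
    · rintro ⟨j, hj, ⟨⟨hjl, hjn⟩, rfl⟩ | ⟨hjr, rfl⟩⟩
      · exact Or.inl ⟨(j : Int), ⟨hjl, by positivity, by exact_mod_cast hjn⟩, rfl⟩
      · exact Or.inr ⟨(j : Int), ⟨hjr, by positivity, by exact_mod_cast Nat.lt_succ_iff.mp hj⟩, rfl⟩
    · rintro (⟨l, ⟨hl, h0, hn⟩, he⟩ | ⟨r, ⟨hr, h0, hn⟩, he⟩)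
      · refine ⟨l.toNat, by omega, Or.inl ⟨⟨by rwa [Int.toNat_of_nonneg h0], by omega⟩, ?_⟩⟩
        rw [← he]; simp [Int.toNat_of_nonneg h0]
      · refine ⟨r.toNat, by omega, Or.inr ⟨by rwa [Int.toNat_of_nonneg h0], ?_⟩⟩
        rw [← he]; simp [Int.toNat_of_nonneg h0]
  have hperm : canon.Perm events := (List.perm_ext_iff_of_nodup hnodC hnodE).2 hmem
  rw [pvSorted2_eq_sorted_lex]
  exact PySem.List.sorted_eq_of_perm_of_pairwise_lt _ _ _ hperm hpw

lemma pv_dt_succ (cs : List Char) (prev j : Nat) (h : prev ≤ j) :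
    (cs.drop prev).take (j + 1 - prev) = (cs.drop prev).take (j - prev) ++ (cs.drop j).take 1 := by
  rw [show j + 1 - prev = (j - prev) + 1 by omega, List.take_add_one, List.getElem?_drop,
      show prev + (j - prev) = j by omega, List.take_one, List.head?_drop]

lemma pvFinish_append (cs : List Char) (es1 es2 : List (Int × Int)) (acc : List Char) (prev : Int) :
    pvFinish cs (es1 ++ es2) acc prev
      = pvFinish cs es2 (es1.foldl (pvStep cs) (acc, prev)).1 (es1.foldl (pvStep cs) (acc, prev)).2 := by
  simp [pvFinish, List.foldl_append]

-- evaluating B's walk over the canonical event list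
lemma pvWalk_eq (cs : List Char) (lp rp : List Int) :
    ∀ (m j prev : Nat) (acc : List Char), prev ≤ j → j + m = cs.length + 1 →
      pvFinish cs ((List.range' j m).flatMap (pvGroup cs lp rp)) acc (prev : Int)
      = acc ++ (cs.drop prev).take (j - prev)
          ++ (List.range' j m).flatMap (pvPiece cs lp rp) := by
  intro m
  induction m with
  | zero =>
    intro j prev acc hpj hjm
    simp only [List.range'_zero, List.flatMap_nil, pvFinish, List.foldl_nil]
    rw [PySem.List.slice_from_natCast]
    rw [List.take_of_length_le (by simp; omega)]
    simp
  | succ m ih =>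
    intro j prev acc hpj hjm
    rw [List.range'_succ, List.flatMap_cons]
    have hj1 : (j + 1) + m = cs.length + 1 := by omega
    have h11 : j + 1 - j = 1 := by omega
    have hsl : PySem.List.slice cs (some (prev : Int)) (some (j : Int))
        = (cs.drop prev).take (j - prev) := PySem.List.slice_natCast cs prev j
    have hslj : PySem.List.slice cs (some (j : Int)) (some (j : Int)) = [] := by
      rw [PySem.List.slice_natCast]; simp
    by_cases hL : (j : Int) ∈ lp ∧ j < cs.length <;> by_cases hR : (j : Int) ∈ rp
    · have hg : pvGroup cs lp rp j = [((j : Int), 0), ((j : Int), 1)] := by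
        simp [pvGroup, hL, hR]
      rw [hg, pvFinish_append]
      simp only [List.foldl_cons, List.foldl_nil, pvStep, hsl, hslj]
      rw [ih (j+1) j _ (by omega) hj1]
      simp [pvPiece, hL, hR, h11, List.append_assoc]
    · have hg : pvGroup cs lp rp j = [((j : Int), 0)] := by
        simp [pvGroup, hL, hR]
      rw [hg, pvFinish_append]
      simp only [List.foldl_cons, List.foldl_nil, pvStep, hsl]
      rw [ih (j+1) j _ (by omega) hj1]
      simp [pvPiece, hL, hR, h11, List.append_assoc]
    · have hg : pvGroup cs lp rp j = [((j : Int), 1)] := by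
        simp [pvGroup, hL, hR]
      rw [hg, pvFinish_append]
      simp only [List.foldl_cons, List.foldl_nil, pvStep, hsl]
      rw [ih (j+1) j _ (by omega) hj1]
      simp [pvPiece, hL, hR, h11, List.append_assoc]
    · have hg : pvGroup cs lp rp j = [] := by
        simp [pvGroup, hL, hR]
      rw [hg, List.nil_append, ih (j+1) prev _ (by omega) hj1,
          pv_dt_succ cs prev j hpj]
      simp [pvPiece, hL, hR, List.append_assoc]

-- ===== VERDICT (by name: the statement is the Claim_ definition above) =====
theorem makeBoldedString_spec : Claim_equal_makeBoldedString := by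
  intro s intervals _ _
  unfold Spec_makeBoldedString makeBoldedString makeBoldedString_alt
  dsimp only
  have heq := pvPosSets_eq intervals
  have hlp : (pvPosSets intervals).1.Nodup := by rw [heq]; exact PySem.Set.nodup_ofList _
  have hrp : (pvPosSets intervals).2.Nodup := by rw [heq]; exact PySem.Set.nodup_ofList _
  have hlen : PySem.Str.len s = PySem.List.len s.toList := rfl
  rw [hlen]
  -- A side
  rw [show PySem.List.len s.toList = ((s.toList.length : Nat) : Int) from PySem.List.len_eq _,
      pvA_core s.toList (pvPosSets intervals).1 (pvPosSets intervals).2]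
  -- B side
  rw [show ((s.toList.length : Nat) : Int) = PySem.List.len s.toList from (PySem.List.len_eq _).symm,
      pvSorted_eq s.toList (pvPosSets intervals).1 (pvPosSets intervals).2 hlp hrp]
  rw [show (fun (st : List Char × Int) (e : Int × Int) =>
      (st.1 ++ PySem.List.slice s.toList (some st.2) (some e.1)
        ++ (if e.2 == 0 then pvLB else pvRB), e.1)) = pvStep s.toList from rfl]
  have hw := pvWalk_eq s.toList (pvPosSets intervals).1 (pvPosSets intervals).2
      (s.toList.length + 1) 0 0 [] (le_refl 0) (by omega)
  rw [List.range_eq_range']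
  simp only [pvFinish] at hw
  rw [show ((0 : Nat) : Int) = (0 : Int) by simp] at hw
  rw [hw]
  simp
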